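-- pv_equiv track=rewrite | github.com/LVK-96/compilers-project | 1/scanner.py | match_num
-- ===== SOURCE A (Python) =====
-- SYMBOL = ["=", ";", ":", ",", "[", "]", "(", ")", "{", "}",
--           "+", "-", "*", "=", "<"]
--
-- def starts_valid_token(char, n):
--     if char and n:
--         return char.isspace() or char.isdigit() or char.isalpha() or char in SYMBOL or (char == "/" and (n == "*" or n == "/"))
--     elif char:
--         return char.isspace() or char.isalpha() or chra.isnum() or char in SYMBOL
--     else:
--         return True
--
-- def strip_from_start(string, substring):
--     return string.replace(substring, "", 1)
--
-- def gather_invalid_char(string):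
--     substring = ""
--     for i, char in enumerate(string):
--         n = string[i + 1] if i + 1 < len(string) else None
--         if starts_valid_token(char, n):
--             break
--
--         substring += char
--
--     return substring
--
-- def report_error(discarded, lineno, reason, errors):
--     error_msg = f"{lineno}. ({discarded}, {reason})"
--     if "\n" in discarded:
--         error_msg = f"{lineno}. ({discarded[:10]}..., {reason})"
--
--     errors.append(error_msg)
--
-- def match_num(string, substring, lineno, errors):
--     if substring.isdigit():
--         for char in string[1:]:
--             if char.isdigit():
--                 substring += char
--
--             elif char in SYMBOL or char.isspace():
--                 break
--
--             else:
--                 # Error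
--                 substring += char
--                 substring += gather_invalid_char(string[len(substring):])
--                 string = strip_from_start(string, substring)
--                 if substring[:2] == "*/":
--                     report_error(substring, lineno, "Unmatched */", errors)
--                 else:
--                     report_error(substring, lineno, "Invalid number", errors)
--                 return None, string, substring, lineno
--
--         string = strip_from_start(string, substring)
--         return "NUM", string, substring, lineno
--
--     return None, None, None, lineno
-- ===== SOURCE B (Python) =====
-- SYMBOL = ["=", ";", ":", ",", "[", "]", "(", ")", "{", "}",
--           "+", "-", "*", "=", "<"]
--
-- DIGITS = "0123456789"
-- SEPARATORS = " \t\n\r" + "".join(SYMBOL)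
--
--
-- def strip_once(string, substring):
--     i = string.find(substring)
--     return string if i < 0 else string[:i] + string[i + len(substring):]
--
--
-- def report_error(discarded, lineno, reason, errors):
--     error_msg = f"{lineno}. ({discarded}, {reason})"
--     if "\n" in discarded:
--         error_msg = f"{lineno}. ({discarded[:10]}..., {reason})"
--     errors.append(error_msg)
--
--
-- def junk(text):
--     """Longest prefix of text whose characters cannot start a token."""
--     if not text:
--         return ""
--     head, rest = text[0], text[1:]
--     if (head in SEPARATORS or head in DIGITS or head.isalpha()
--             or (head == "/" and rest[:1] in ("*", "/"))):
--         return ""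
--     return head + junk(rest)
--
--
-- def match_num(string, substring, lineno, errors):
--     if not substring or substring.strip(DIGITS):
--         return None, None, None, lineno
--     tail = string[1:].lstrip(DIGITS)            # text after the maximal digit run
--     grown = substring + string[1:len(string) - len(tail)]
--     if tail[:1] in SEPARATORS:                  # end of text, or a separator char
--         return "NUM", strip_once(string, grown), grown, lineno
--     grown += tail[0] + junk(string[len(grown) + 1:])
--     reason = "Unmatched */" if grown.startswith("*/") else "Invalid number"
--     report_error(grown, lineno, reason, errors)
--     return None, strip_once(string, grown), grown, lineno
-- ===== Notes on version B (the rewrite author's own statement) =====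
-- stated objective: alternative
-- what changed: A grows the token one character at a time inside an explicit scan loop with a three-way branch and early returns; B has no character loop at all: it strips the maximal digit run with str.lstrip in one library call, classifies the single terminating character by membership in a precomputed separator string (with tail[:1] uniformly covering end-of-input), gathers the invalid run with a small recursive helper, and removes the token with str.find-based splicing instead of str.replace.
-- crash fix: A raises NameError (the 'chra' typo in starts_valid_token) whenever the error path's gather_invalid_char scan reaches the last character of the remaining text with that character not a space or letter; B returns the natural error tuple there. — e.g. on match_num("1$$", "1", 0, []): A raises NameError, B returns (none, some "", some "1$$", 0)
import Mathlib
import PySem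

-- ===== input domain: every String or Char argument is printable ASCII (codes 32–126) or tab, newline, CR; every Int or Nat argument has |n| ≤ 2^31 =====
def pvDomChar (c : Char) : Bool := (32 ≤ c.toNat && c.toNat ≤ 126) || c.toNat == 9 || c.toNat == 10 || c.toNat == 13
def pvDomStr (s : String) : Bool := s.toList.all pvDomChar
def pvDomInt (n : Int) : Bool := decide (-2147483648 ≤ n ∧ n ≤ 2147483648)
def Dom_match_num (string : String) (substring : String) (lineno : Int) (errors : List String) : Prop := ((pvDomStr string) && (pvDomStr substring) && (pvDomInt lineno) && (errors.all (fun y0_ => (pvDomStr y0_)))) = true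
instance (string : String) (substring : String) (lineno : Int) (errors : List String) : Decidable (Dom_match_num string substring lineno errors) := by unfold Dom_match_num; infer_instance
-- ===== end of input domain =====

-- B has no character loop: it strips the maximal digit run with a library lstrip, classifies the
-- single terminating character by membership in a precomputed separator string, gathers the
-- invalid run with a small recursive helper, and splices the token out via str.find (objective:
-- alternative). Python A/B also append an error message to the mutable `errors` argument on the
-- error path (identically in both); the equivalence proved here is about the RETURN value only.

-- ===== PORT A =====
def pvSYMBOL : List Char := ['=', ';', ':', ',', '[', ']', '(', ')', '{', '}',
                             '+', '-', '*', '=', '<']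

-- strip_from_start: string.replace(substring, "", 1) — hand port (PySem replace has no count
-- argument): removes the first occurrence of sub, exact incl. sub = "" (find [] = 0, removes 0 chars)
def stripFromStart (s sub : List Char) : List Char :=
  let i := PySem.Chars.find s sub
  if i = -1 then s else s.take i.toNat ++ s.drop (i.toNat + sub.length)

-- starts_valid_token(char, n) for the two-argument (n a real char) case
def startsValidA (c n : Char) : Bool :=
  PySem.Chars.isspace c || PySem.Chars.isdigit c || PySem.Chars.isalpha c ||
  pvSYMBOL.contains c || (c == '/' && (n == '*' || n == '/'))

-- gather_invalid_char. On a final character that is neither a space nor a letter Python A raises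
-- NameError (the 'chra' typo in starts_valid_token); those inputs are excluded by Pre_match_num,
-- so the port's value there ([] as if breaking) is never relied upon.
def gatherA : List Char → List Char
  | [] => []
  | [_] => []
  | c :: n :: rest => if startsValidA c n then [] else c :: gatherA (n :: rest)

-- the 'for char in string[1:]' loop; `orig` is the unmutated string, `sub` the growing substring
def loopA (orig : List Char) (lineno : Int) :
    List Char → List Char → Option String × Option String × Option String × Int
  | [], sub =>
      (some "NUM", some (String.ofList (stripFromStart orig sub)), some (String.ofList sub), lineno)
  | c :: rest, sub =>
      if PySem.Chars.isdigit c then loopA orig lineno rest (sub ++ [c])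
      else if pvSYMBOL.contains c || PySem.Chars.isspace c then
        (some "NUM", some (String.ofList (stripFromStart orig sub)), some (String.ofList sub), lineno)
      else
        -- error branch: substring += char; += gather_invalid_char(string[len(substring):])
        let sub2 := (sub ++ [c]) ++ gatherA (orig.drop (sub ++ [c]).length)
        (none, some (String.ofList (stripFromStart orig sub2)), some (String.ofList sub2), lineno)

def match_num (string : String) (substring : String) (lineno : Int) (_errors : List String) :
    Option String × Option String × Option String × Int :=
  if PySem.Str.strIsdigit substring then
    -- string[1:] is drop 1
    loopA string.toList lineno (string.toList.drop 1) substring.toList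
  else (none, none, none, lineno)

-- ===== PORT B =====
def digitsB : List Char := ['0','1','2','3','4','5','6','7','8','9']

-- SEPARATORS = " \t\n\r" + "".join(SYMBOL)
def sepB : List Char := [' ', '\t', '\n', '\r',
                         '=', ';', ':', ',', '[', ']', '(', ')', '{', '}',
                         '+', '-', '*', '=', '<']

-- strip_once via str.find and slicing
def stripOnceB (s sub : List Char) : List Char :=
  let i := PySem.Chars.find s sub
  if i < 0 then s else s.take i.toNat ++ s.drop (i.toNat + sub.length)

-- junk(text): recursion on the text; rest[:1] in ("*","/") is the take-1 comparison
def junkB : List Char → List Char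
  | [] => []
  | c :: rest =>
      if sepB.contains c || digitsB.contains c || PySem.Chars.isalpha c ||
         (c == '/' && (rest.take 1 == ['*'] || rest.take 1 == ['/'])) then []
      else c :: junkB rest

def match_num_alt (string : String) (substring : String) (lineno : Int) (_errors : List String) :
    Option String × Option String × Option String × Int :=
  let cs := string.toList
  let sub0 := substring.toList
  -- if not substring or substring.strip(DIGITS):
  if sub0.isEmpty || !(PySem.Chars.stripChars sub0 digitsB).isEmpty then
    (none, none, none, lineno)
  else
    -- tail = string[1:].lstrip(DIGITS)
    let tail := (cs.drop 1).dropWhile (fun c => digitsB.contains c)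
    -- grown = substring + string[1:len(string) - len(tail)]
    let grown := sub0 ++ ((cs.take (cs.length - tail.length)).drop 1)
    -- tail[:1] in SEPARATORS — substring membership; "" is in every string
    if PySem.Chars.isIn (tail.take 1) sepB then
      (some "NUM", some (String.ofList (stripOnceB cs grown)), some (String.ofList grown), lineno)
    else
      match tail with
      | [] => (none, none, none, lineno)  -- unreachable: tail = [] makes the isIn test true
      | c :: _ =>
          let grown2 := grown ++ [c] ++ junkB (cs.drop (grown.length + 1))
          (none, some (String.ofList (stripOnceB cs grown2)), some (String.ofList grown2), lineno)

-- ===== PRECONDITION & SPEC =====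
-- the two-char validity test of A's starts_valid_token, restated for the precondition only
def pvValidPair (c n : Char) : Bool :=
  PySem.Chars.isspace c || PySem.Chars.isdigit c || PySem.Chars.isalpha c ||
  pvSYMBOL.contains c || (c == '/' && (n == '*' || n == '/'))

-- gather_invalid_char's scan over t reaches the final character and that character is neither a
-- space nor a letter — exactly where Python A hits the 'chra' NameError
def pvCrashTail (t : List Char) : Bool :=
  !t.isEmpty &&
  (t.zip t.tail).all (fun p => !pvValidPair p.1 p.2) &&
  !(match t.getLast? with
    | some c => PySem.Chars.isspace c || PySem.Chars.isalpha c
    | none => true)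

-- Python A raises NameError exactly here: substring is all digits, the first non-digit character
-- of string[1:] can start neither a number continuation nor a token (error path), and the
-- remaining text handed to gather_invalid_char ends in a crash-provoking character (pvCrashTail)
def pvCrashCond (cs sub : List Char) : Bool :=
  let rest := cs.drop 1
  PySem.Chars.strIsdigit sub &&
  (match (rest.dropWhile PySem.Chars.isdigit).head? with
   | none => false
   | some c =>
       !(pvSYMBOL.contains c || PySem.Chars.isspace c) &&
       pvCrashTail (cs.drop (sub.length + (rest.takeWhile PySem.Chars.isdigit).length + 1)))

-- Pre_ excludes exactly the inputs on which Python A raises NameError (the 'chra' typo in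
-- starts_valid_token); A returns normally on every other input.
def Pre_match_num (string : String) (substring : String) (lineno : Int) (errors : List String) : Prop :=
  pvCrashCond string.toList substring.toList = false

instance (string : String) (substring : String) (lineno : Int) (errors : List String) :
    Decidable (Pre_match_num string substring lineno errors) := by
  unfold Pre_match_num; infer_instance

def pvWitness_match_num : String × String × Int × List String := ("1+2", "1", 1, [])

-- A raises NameError whenever the error path's gather_invalid_char scan reaches a final character
-- that is neither a space nor a letter; B returns the natural error tuple there.
def Raises_match_num (string : String) (substring : String) (lineno : Int) (errors : List String) : Prop :=
  pvCrashCond string.toList substring.toList = true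

instance (string : String) (substring : String) (lineno : Int) (errors : List String) :
    Decidable (Raises_match_num string substring lineno errors) := by
  unfold Raises_match_num; infer_instance

def pvRaiseWitness_match_num : String × String × Int × List String := ("1$$", "1", 0, [])
def pvRaiseWitnessOut_match_num : Option String × Option String × Option String × Int :=
  (none, some "", some "1$$", 0)

def Spec_match_num (string : String) (substring : String) (lineno : Int) (errors : List String) (out : Option String × Option String × Option String × Int) : Prop := out = match_num_alt string substring lineno errors
instance (string : String) (substring : String) (lineno : Int) (errors : List String) (out : Option String × Option String × Option String × Int) : Decidable (Spec_match_num string substring lineno errors out) := by unfold Spec_match_num; infer_instance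

-- ===== CLAIM (what is proved, stated in full; the proofs are below) =====
def Claim_equal_match_num : Prop := ∀ (string : String) (substring : String) (lineno : Int) (errors : List String), Dom_match_num string substring lineno errors → Pre_match_num string substring lineno errors → Spec_match_num string substring lineno errors (match_num string substring lineno errors)

def Claim_raises_match_num : Prop := (∀ (string : String) (substring : String) (lineno : Int) (errors : List String), Dom_match_num string substring lineno errors → Raises_match_num string substring lineno errors → ¬ Pre_match_num string substring lineno errors) ∧ (Dom_match_num (pvRaiseWitness_match_num.1) (pvRaiseWitness_match_num.2.1) (pvRaiseWitness_match_num.2.2.1) (pvRaiseWitness_match_num.2.2.2) ∧ Raises_match_num (pvRaiseWitness_match_num.1) (pvRaiseWitness_match_num.2.1) (pvRaiseWitness_match_num.2.2.1) (pvRaiseWitness_match_num.2.2.2) ∧ match_num_alt (pvRaiseWitness_match_num.1) (pvRaiseWitness_match_num.2.1) (pvRaiseWitness_match_num.2.2.1) (pvRaiseWitness_match_num.2.2.2) = pvRaiseWitnessOut_match_num)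

-- ===== LEMMAS AND PROOFS =====

-- character-level bridges
theorem char_eq_toNat (c d : Char) : (c = d) ↔ c.toNat = d.toNat := by
  constructor
  · rintro rfl; rfl
  · intro h; exact Char.ext (UInt32.toNat_inj.mp h)

theorem digit_mem (c : Char) : digitsB.contains c = PySem.Chars.isdigit c := by
  simp only [digitsB, List.contains_eq_mem, List.mem_cons, List.not_mem_nil, or_false,
    PySem.Chars.isdigit, decide_eq_decide, ← Bool.decide_and]
  simp only [char_eq_toNat, Char.le_def, UInt32.le_iff_toNat_le]
  have lit : ('0'.toNat = 48 ∧ '1'.toNat = 49 ∧ '2'.toNat = 50 ∧ '3'.toNat = 51 ∧ '4'.toNat = 52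
      ∧ '5'.toNat = 53 ∧ '6'.toNat = 54 ∧ '7'.toNat = 55 ∧ '8'.toNat = 56 ∧ '9'.toNat = 57
      ∧ ('0':Char).val.toNat = 48 ∧ ('9':Char).val.toNat = 57) := by decide
  obtain ⟨e0,e1,e2,e3,e4,e5,e6,e7,e8,e9,f0,f9⟩ := lit
  have hv : c.toNat = c.val.toNat := rfl
  omega

theorem digit_fun : (fun c => digitsB.contains c) = PySem.Chars.isdigit :=
  funext digit_mem

-- within the ASCII domain, Python's isspace is exactly " \t\n\r"
theorem sep_mem (c : Char) (h : pvDomChar c = true) :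
    sepB.contains c = (pvSYMBOL.contains c || PySem.Chars.isspace c) := by
  have hsplit : sepB.contains c
      = (([' ', '\t', '\n', '\r'] : List Char).contains c || pvSYMBOL.contains c) := by
    simp only [sepB, pvSYMBOL, List.contains_eq_mem, List.mem_cons, List.not_mem_nil, or_false,
      ← Bool.decide_or]
    congr 1
    exact propext (by tauto)
  rw [hsplit]
  have hws : (([' ', '\t', '\n', '\r'] : List Char).contains c) = PySem.Chars.isspace c := by
    simp only [List.contains_eq_mem, List.mem_cons, List.not_mem_nil, or_false,
      PySem.Chars.isspace, decide_eq_decide, ← Bool.decide_and, ← Bool.decide_or]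
    simp only [char_eq_toNat]
    simp only [pvDomChar, Bool.or_eq_true, Bool.and_eq_true, decide_eq_true_eq,
      Nat.beq_eq_true_eq] at h
    have lit : (' '.toNat = 32 ∧ '\t'.toNat = 9 ∧ '\n'.toNat = 10 ∧ '\r'.toNat = 13) := by decide
    obtain ⟨w1,w2,w3,w4⟩ := lit
    omega
  rw [hws, Bool.or_comm]

theorem beq_single (a b : Char) : ([a] == [b]) = (a == b) := by
  simp [BEq.beq, List.beq]

-- tail[:1] in SEPARATORS: "" is in every string; a 1-char string is char membership
theorem isIn_singleton (c : Char) (s : List Char) : PySem.Chars.isIn [c] s = s.contains c := by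
  rw [Bool.eq_iff_iff, PySem.Chars.isIn_iff_infix, List.contains_eq_mem, decide_eq_true_eq]
  constructor
  · rintro ⟨u, v, rfl⟩; simp
  · intro hm
    obtain ⟨u, v, rfl⟩ := List.append_of_mem hm
    exact ⟨u, v, by simp⟩

-- substring.strip(DIGITS) is empty iff every character is a digit
theorem stripChars_empty_iff (l chars : List Char) :
    (PySem.Chars.stripChars l chars).isEmpty = l.all (fun c => chars.contains c) := by
  rw [Bool.eq_iff_iff, List.isEmpty_iff, List.all_eq_true]
  unfold PySem.Chars.stripChars
  simp only [List.reverse_eq_nil_iff, List.dropWhile_eq_nil_iff, List.mem_reverse]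
  constructor
  · intro h x hx
    rcases List.mem_append.mp
        ((List.takeWhile_append_dropWhile (p := fun c => chars.contains c) (l := l)) ▸ hx) with
      hxt | hxd
    · exact List.mem_takeWhile_imp hxt
    · exact h x hxd
  · intro h x hx
    exact h x (List.dropWhile_sublist _ |>.subset hx)

-- string[1:len(string) - len(tail)] is the maximal digit run after the first character
theorem takeSlice (p : Char → Bool) (cs : List Char) :
    (cs.take (cs.length - ((cs.drop 1).dropWhile p).length)).drop 1
      = (cs.drop 1).takeWhile p := by
  cases cs with
  | nil => rfl
  | cons c rest =>
      simp only [List.drop_succ_cons, List.drop_zero, List.length_cons]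
      have hlen : (rest.takeWhile p).length + (rest.dropWhile p).length = rest.length := by
        rw [← List.length_append, List.takeWhile_append_dropWhile]
      have h1 : rest.length + 1 - (rest.dropWhile p).length = (rest.takeWhile p).length + 1 := by
        omega
      rw [h1, List.take_succ_cons, List.drop_succ_cons, List.drop_zero]
      exact (List.prefix_iff_eq_take.mp (List.takeWhile_prefix p)).symm

theorem stripOnce_eq (s sub : List Char) : stripOnceB s sub = stripFromStart s sub := by
  unfold stripOnceB stripFromStart
  have h := PySem.Chars.neg_one_le_find s sub
  by_cases hneg : PySem.Chars.find s sub = -1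
  · simp [hneg]
  · have hlt : ¬ PySem.Chars.find s sub < 0 := by omega
    simp [hneg, hlt]

-- the shape both programs reduce to: grown substring `sub`, terminating char `stop?`, and the
-- invalid-text gatherer `gat` (A: gatherA, B: junkB), applied to cs.drop (|sub|+1)
def pvCore (cs : List Char) (lineno : Int) (sub : List Char) (stop? : Option Char)
    (gat : List Char → List Char) : Option String × Option String × Option String × Int :=
  match stop? with
  | none =>
      (some "NUM", some (String.ofList (stripFromStart cs sub)), some (String.ofList sub), lineno)
  | some c =>
      if pvSYMBOL.contains c || PySem.Chars.isspace c then
        (some "NUM", some (String.ofList (stripFromStart cs sub)), some (String.ofList sub), lineno)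
      else
        let sub2 := sub ++ [c] ++ gat (cs.drop (sub.length + 1))
        (none, some (String.ofList (stripFromStart cs sub2)), some (String.ofList sub2), lineno)

theorem pvCore_congr (cs : List Char) (lineno : Int) (sub : List Char) (stop? : Option Char)
    (g1 g2 : List Char → List Char)
    (h : ∀ c, stop? = some c → (pvSYMBOL.contains c || PySem.Chars.isspace c) = false →
      g1 (cs.drop (sub.length + 1)) = g2 (cs.drop (sub.length + 1))) :
    pvCore cs lineno sub stop? g1 = pvCore cs lineno sub stop? g2 := by
  cases stop? with
  | none => rfl
  | some c =>
      simp only [pvCore]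
      split
      · rfl
      · next hcond => rw [h c rfl (by simpa using hcond)]

-- the validity tests of the two gatherers agree on domain characters
theorem junk_cond (c n : Char) (hd : pvDomChar c = true) :
    (sepB.contains c || digitsB.contains c || PySem.Chars.isalpha c ||
      (c == '/' && ([n] == ['*'] || [n] == ['/']))) = startsValidA c n := by
  rw [sep_mem c hd, digit_mem, beq_single, beq_single]
  unfold startsValidA
  rw [Bool.eq_iff_iff]
  simp only [Bool.or_eq_true]
  tauto

theorem gatherA_eq_junkB (t : List Char) (hd : t.all pvDomChar = true)
    (h : pvCrashTail t = false) : gatherA t = junkB t := by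
  induction t with
  | nil => rfl
  | cons c rest ih =>
      simp only [List.all_cons, Bool.and_eq_true] at hd
      obtain ⟨hdc, hdr⟩ := hd
      cases rest with
      | nil =>
          -- scan at the last character: crash-free means it is a space or a letter
          have hsa : (PySem.Chars.isspace c || PySem.Chars.isalpha c) = true := by
            by_contra hx
            have hx' : (PySem.Chars.isspace c || PySem.Chars.isalpha c) = false := by
              simpa using hx
            rw [show pvCrashTail [c] = !(PySem.Chars.isspace c || PySem.Chars.isalpha c) from by
              simp [pvCrashTail], hx'] at h
            simp at h
          have hcond : (sepB.contains c || digitsB.contains c || PySem.Chars.isalpha c ||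
              (c == '/' && (([] : List Char).take 1 == ['*'] ||
                ([] : List Char).take 1 == ['/']))) = true := by
            rw [sep_mem c hdc]
            rcases Bool.or_eq_true .. ▸ hsa with hs | ha
            · simp [hs]
            · simp [ha]
          show gatherA [c] = junkB [c]
          rw [show junkB [c] = if (sepB.contains c || digitsB.contains c ||
              PySem.Chars.isalpha c || (c == '/' && (([] : List Char).take 1 == ['*'] ||
                ([] : List Char).take 1 == ['/']))) then [] else c :: junkB [] from rfl,
            hcond]
          rfl
      | cons n rest' =>
          show (if startsValidA c n then [] else c :: gatherA (n :: rest')) = _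
          have hc : (sepB.contains c || digitsB.contains c || PySem.Chars.isalpha c ||
              (c == '/' && ((n :: rest').take 1 == ['*'] || (n :: rest').take 1 == ['/'])))
              = startsValidA c n := by
            rw [show (n :: rest').take 1 = [n] from rfl]
            exact junk_cond c n hdc
          rw [show junkB (c :: n :: rest') = if (sepB.contains c || digitsB.contains c ||
              PySem.Chars.isalpha c || (c == '/' && ((n :: rest').take 1 == ['*'] ||
                (n :: rest').take 1 == ['/']))) then [] else c :: junkB (n :: rest') from rfl,
            hc]
          by_cases hv : startsValidA c n = true
          · rw [hv]; simp
          · have hvf : startsValidA c n = false := by simpa using hv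
            have hpv : pvValidPair c n = false := by
              simpa [pvValidPair, startsValidA] using hvf
            have h' : pvCrashTail (n :: rest') = false := by
              simp only [pvCrashTail, List.isEmpty_cons, List.tail_cons, List.zip_cons_cons,
                List.all_cons, hpv, Bool.not_false, Bool.true_and] at h ⊢
              rcases Bool.and_eq_false_iff.mp h with h1 | h1
              · exact Bool.and_eq_false_iff.mpr (Or.inl h1)
              · refine Bool.and_eq_false_iff.mpr (Or.inr ?_)
                simpa [List.getLast?_cons_cons] using h1
            rw [hvf]
            simp [ih hdr h']

-- characterization of A's loop: it appends the digit run in one go, then branches once (pvCore)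
theorem loopA_eq (orig : List Char) (lineno : Int) (rest : List Char) :
    ∀ sub, loopA orig lineno rest sub =
      pvCore orig lineno (sub ++ rest.takeWhile PySem.Chars.isdigit)
        (rest.dropWhile PySem.Chars.isdigit).head? gatherA := by
  induction rest with
  | nil => intro sub; simp [loopA, pvCore]
  | cons c rest' ih =>
      intro sub
      by_cases hd : PySem.Chars.isdigit c = true
      · have := ih (sub ++ [c])
        simp only [loopA, hd, if_pos, List.takeWhile_cons, List.dropWhile_cons]
        simpa [hd, List.append_assoc] using this
      · simp [loopA, hd, pvCore, List.append_assoc]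

-- B reduced to the same shape
theorem alt_eq_core (string substring : String) (lineno : Int) (errors : List String)
    (hstr : string.toList.all pvDomChar = true)
    (hds : PySem.Str.strIsdigit substring = true) :
    match_num_alt string substring lineno errors =
      pvCore string.toList lineno
        (substring.toList ++ (string.toList.drop 1).takeWhile PySem.Chars.isdigit)
        ((string.toList.drop 1).dropWhile PySem.Chars.isdigit).head? junkB := by
  have hds' : PySem.Chars.strIsdigit substring.toList = true := by simpa using hds
  simp only [PySem.Chars.strIsdigit, Bool.and_eq_true, Bool.not_eq_eq_eq_not, Bool.not_true] at hds'
  obtain ⟨hne, hall⟩ := hds'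
  have hguard : (substring.toList.isEmpty
      || !(PySem.Chars.stripChars substring.toList digitsB).isEmpty) = false := by
    rw [stripChars_empty_iff, digit_fun, hall]
    simp [hne]
  simp only [match_num_alt, hguard]
  simp only [Bool.false_eq_true, if_false, digit_fun, takeSlice]
  set cs := string.toList
  set sub := substring.toList ++ (cs.drop 1).takeWhile PySem.Chars.isdigit with hsub
  cases htail : (cs.drop 1).dropWhile PySem.Chars.isdigit with
  | nil =>
      simp [PySem.Chars.isIn_nil, pvCore, stripOnce_eq]
  | cons c t' =>
      have hdom_c : pvDomChar c = true := by
        have hmem : c ∈ cs := by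
          have h1 : c ∈ (cs.drop 1).dropWhile PySem.Chars.isdigit := by
            rw [htail]; exact List.mem_cons_self ..
          exact List.mem_of_mem_drop ((List.dropWhile_sublist _).subset h1)
        exact List.all_eq_true.mp hstr c hmem
      simp only [List.take_succ_cons, List.take_zero, isIn_singleton, sep_mem c hdom_c]
      by_cases hc : (pvSYMBOL.contains c || PySem.Chars.isspace c) = true
      · simp [pvCore, stripOnce_eq]
      · have hcf : (pvSYMBOL.contains c || PySem.Chars.isspace c) = false := by simpa using hc
        simp [pvCore, stripOnce_eq]

-- ===== VERDICT (by name: the statement is the Claim_ definition above) =====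
theorem match_num_spec : Claim_equal_match_num := by
  intro string substring lineno errors hdom hpre
  unfold Spec_match_num
  have hstr : string.toList.all pvDomChar = true := by
    have := hdom
    unfold Dom_match_num pvDomStr at this
    simp only [Bool.and_eq_true] at this
    exact this.1.1.1
  by_cases hds : PySem.Str.strIsdigit substring = true
  · rw [alt_eq_core string substring lineno errors hstr hds]
    unfold match_num
    rw [hds]
    simp only [if_true]
    rw [loopA_eq]
    refine pvCore_congr _ _ _ _ _ _ ?_
    intro c hh hc
    have hsd : PySem.Chars.strIsdigit substring.toList = true := by simpa using hds
    simp only [Pre_match_num, pvCrashCond] at hpre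
    rw [hh] at hpre
    simp only [hsd, Bool.true_and, hc, Bool.not_false] at hpre
    have hlen : (substring.toList ++
        (string.toList.drop 1).takeWhile PySem.Chars.isdigit).length + 1 =
        substring.toList.length +
          ((string.toList.drop 1).takeWhile PySem.Chars.isdigit).length + 1 := by
      simp
    refine gatherA_eq_junkB _ ?_ ?_
    · exact List.all_eq_true.mpr
        (fun x hx => List.all_eq_true.mp hstr x (List.mem_of_mem_drop hx))
    · rw [hlen]; exact hpre
  · have hds' : PySem.Str.strIsdigit substring = false := by simpa using hds
    have hne : (substring.toList.isEmpty
        || !(PySem.Chars.stripChars substring.toList digitsB).isEmpty) = true := by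
      rw [stripChars_empty_iff,
        show (fun c => digitsB.contains c) = PySem.Chars.isdigit from digit_fun]
      have : PySem.Chars.strIsdigit substring.toList = false := by simpa using hds'
      simp only [PySem.Chars.strIsdigit, Bool.and_eq_false_iff, Bool.not_eq_eq_eq_not,
        Bool.not_false] at this
      rcases this with h1 | h1
      · simp [h1]
      · simp [h1]
    simp only [match_num, match_num_alt, hds', hne]
    simp

@[simp] theorem match_num_raises : Claim_raises_match_num := by
  unfold Claim_raises_match_num
  refine ⟨?_, by decide⟩
  intro string substring lineno errors _ hr hp
  unfold Raises_match_num at hr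
  unfold Pre_match_num at hp
  simp [hr] at hp
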